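-- pv_equiv track=rewrite | github.com/sancoder/noomnem | noomnem.py | scheme23_encode_ints
-- ===== SOURCE A (Python) =====
-- bigint = int
--
-- def combi(n: int, m: int) -> bigint:
--     assert n > 0 and m >= 0
--     assert m <= n <= 2048
--     result = 1
--     div = 1
--     while div <= m:
--         result = result * n // div
--         n -= 1
--         div += 1
--     return result
--
-- def combi2(n: int, m: int) -> bigint:
--     if n < m:
--         return 0
--     return combi(n, m)
--
-- def scheme23_encode_ints(value: bigint, m: int) -> list[int]:
--     result = []
--     for i in range(m, 0, -1):
--         cur = i
--         test = combi2(cur, i)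
--         while test <= value:
--             cur += 1
--             test = combi2(cur, i)
--
--         cur -= 1
--         result.append(cur)
--         value -= combi2(cur, i)
--     return result[::-1]
-- ===== SOURCE B (Python) =====
-- def _binom(n, k):
--     # C(n, k) via symmetric numerator/denominator products (exact final division)
--     if n < k:
--         return 0
--     k = min(k, n - k)
--     p = 1
--     f = 1
--     for j in range(k):
--         p *= n - j
--         f *= j + 1
--     return p // f
--
--
-- def scheme23_encode_ints(value, m):
--     out = []
--     i = m
--     while i > 0:
--         # largest c with C(c, i) <= value; i-1 is the floor answer (C(i-1, i) == 0)
--         lo = i - 1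
--         d = 1
--         while _binom(lo + d, i) <= value:
--             d *= 2
--         hi = lo + d
--         while hi - lo > 1:
--             mid = (lo + hi) // 2
--             if _binom(mid, i) <= value:
--                 lo = mid
--             else:
--                 hi = mid
--         value -= _binom(lo, i)
--         out = [lo] + out
--         i -= 1
--     return out
-- ===== Notes on version B (the rewrite author's own statement) =====
-- stated objective: faster
-- what changed: Replaces A's per-digit linear scan that recomputes each binomial from scratch with doubling plus binary search for each digit using a numerator/denominator binomial helper, and builds the output by prepending instead of append-then-reverse.
import Mathlib
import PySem

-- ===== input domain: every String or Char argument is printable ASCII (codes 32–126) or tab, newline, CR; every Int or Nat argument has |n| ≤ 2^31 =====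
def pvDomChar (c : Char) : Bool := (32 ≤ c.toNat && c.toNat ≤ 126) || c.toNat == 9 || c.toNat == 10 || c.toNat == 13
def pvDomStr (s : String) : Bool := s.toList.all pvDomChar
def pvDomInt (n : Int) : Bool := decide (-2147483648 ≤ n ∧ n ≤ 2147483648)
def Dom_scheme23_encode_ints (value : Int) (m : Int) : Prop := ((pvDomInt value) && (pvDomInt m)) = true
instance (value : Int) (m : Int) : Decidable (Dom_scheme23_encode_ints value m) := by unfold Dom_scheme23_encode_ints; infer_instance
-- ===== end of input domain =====

-- B replaces A's linear search with exhaustive binomial recomputation by doubling + binary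
-- search with a numerator/denominator binomial helper (alternative algorithm; asymptotically
-- fewer probes). Equivalence of the return values is proved for all inputs satisfying Pre_.

-- ===== PORT A =====
-- the while-loop of combi (asserts dropped: inputs on which they fire are outside Pre_)
def combiALoop (n : Int) (m : Int) (result : Int) (dv : Int) : Int :=
  if dv ≤ m then combiALoop (n - 1) m (PySem.Int.floordiv (result * n) dv) (dv + 1)
  else result
termination_by (m + 1 - dv).toNat
decreasing_by omega

def combiA (n : Int) (m : Int) : Int := combiALoop n m 1 1

def combi2A (n : Int) (m : Int) : Int := if n < m then 0 else combiA n m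

-- the inner 'while test <= value: cur += 1' loop; fuel is only a totality guard
def searchA (value i : Int) : Nat → Int → Int
  | 0, cur => cur
  | f + 1, cur => if combi2A cur i ≤ value then searchA value i f (cur + 1) else cur

def scheme23_encode_ints (value : Int) (m : Int) : List Int :=
  let st := (PySem.List.pyRange m 0 (-1)).foldl
    (fun (st : List Int × Int) i =>
      let cur := searchA st.2 i (st.2.toNat + 2) i - 1
      (st.1 ++ [cur], st.2 - combi2A cur i)) ([], value)
  (PySem.List.slice? st.1 none none (-1)).getD []

-- ===== PORT B =====
def binomB (n : Int) (k : Int) : Int :=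
  if n < k then 0
  else
    let k' := min k (n - k)
    let st := (PySem.List.pyRange 0 k' 1).foldl
      (fun (st : Int × Int) j => (st.1 * (n - j), st.2 * (j + 1))) (1, 1)
    PySem.Int.floordiv st.1 st.2

-- the 'while _binom(lo + d, i) <= value: d *= 2' loop; fuel is only a totality guard
def doubB (value i : Int) : Nat → Int → Int
  | 0, d => d
  | f + 1, d => if binomB (i - 1 + d) i ≤ value then doubB value i f (d * 2) else d

def bsearchB (value i : Int) : Nat → Int → Int → Int
  | 0, lo, _ => lo
  | f + 1, lo, hi =>
    if 1 < hi - lo then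
      let mid := PySem.Int.floordiv (lo + hi) 2
      if binomB mid i ≤ value then bsearchB value i f mid hi else bsearchB value i f lo mid
    else lo

def loopB : Nat → Int → Int → List Int → List Int
  | 0, _, _, out => out
  | f + 1, value, i, out =>
    if 0 < i then
      let hi := i - 1 + doubB value i (value.toNat + 2) 1
      let lo := bsearchB value i (hi - (i - 1)).toNat (i - 1) hi
      loopB f (value - binomB lo i) (i - 1) (lo :: out)
    else out

def scheme23_encode_ints_alt (value : Int) (m : Int) : List Int := loopB m.toNat value m []

-- ===== PRECONDITION & SPEC =====
-- Pre_ excludes exactly the inputs on which A raises AssertionError in combi (m > 2048, or a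
-- probed cur exceeding 2048, i.e. C(2048, m) <= value, written multiplicatively as
-- value * m! < 2048 * ... * (2048 - m + 1) so that `decide` evaluates it cheaply);
-- A returns normally everywhere else.
def Pre_scheme23_encode_ints (value : Int) (m : Int) : Prop :=
  m ≤ 0 ∨ (m ≤ 2048 ∧ value * (Nat.factorial m.toNat : Int) < (Nat.descFactorial 2048 m.toNat : Int))
instance (value : Int) (m : Int) : Decidable (Pre_scheme23_encode_ints value m) := by
  unfold Pre_scheme23_encode_ints; infer_instance

def pvWitness_scheme23_encode_ints : Int × Int := (100, 3)

def Spec_scheme23_encode_ints (value : Int) (m : Int) (out : List Int) : Prop := out = scheme23_encode_ints_alt value m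
instance (value : Int) (m : Int) (out : List Int) : Decidable (Spec_scheme23_encode_ints value m out) := by unfold Spec_scheme23_encode_ints; infer_instance

-- ===== CLAIM (what is proved, stated in full; the proofs are below) =====
def Claim_equal_scheme23_encode_ints : Prop := ∀ (value : Int) (m : Int), Dom_scheme23_encode_ints value m → Pre_scheme23_encode_ints value m → Spec_scheme23_encode_ints value m (scheme23_encode_ints value m)


-- ===== LEMMAS AND PROOFS =====

-- semantic value of both binomial helpers
def chooseI (c i : Int) : Int := if c < i then 0 else (Nat.choose c.toNat i.toNat : Int)

-- zeta-reduced unfolding lemmas for the let-bearing definitions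
theorem bsearchB_succ (value i : Int) (f : Nat) (lo hi : Int) :
    bsearchB value i (f + 1) lo hi =
      if 1 < hi - lo then
        if binomB (PySem.Int.floordiv (lo + hi) 2) i ≤ value then
          bsearchB value i f (PySem.Int.floordiv (lo + hi) 2) hi
        else bsearchB value i f lo (PySem.Int.floordiv (lo + hi) 2)
      else lo := rfl

theorem loopB_succ (f : Nat) (value i : Int) (out : List Int) :
    loopB (f + 1) value i out =
      if 0 < i then
        loopB f
          (value - binomB (bsearchB value i
              ((i - 1 + doubB value i (value.toNat + 2) 1) - (i - 1)).toNat
              (i - 1) (i - 1 + doubB value i (value.toNat + 2) 1)) i)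
          (i - 1)
          (bsearchB value i ((i - 1 + doubB value i (value.toNat + 2) 1) - (i - 1)).toNat
            (i - 1) (i - 1 + doubB value i (value.toNat + 2) 1) :: out)
      else out := rfl

theorem combiALoop_inv (n0 m : Int) (hmn : m ≤ n0) :
    ∀ (k : Nat) (dv : Int), 1 ≤ dv → dv ≤ m + 1 → (m + 1 - dv).toNat = k →
      combiALoop (n0 - (dv - 1)) m (Nat.choose n0.toNat (dv - 1).toNat : Int) dv
        = (Nat.choose n0.toNat m.toNat : Int) := by
  intro k
  induction k with
  | zero =>
    intro dv h1 h2 h3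
    have hdv : dv = m + 1 := by omega
    subst hdv
    rw [combiALoop, if_neg (by omega)]
    congr 2
    omega
  | succ k ih =>
    intro dv h1 h2 h3
    rw [combiALoop, if_pos (by omega : dv ≤ m)]
    have hd1 : (dv - 1).toNat + 1 = dv.toNat := by omega
    have hdle : (dv - 1).toNat ≤ n0.toNat := by omega
    have key : (Nat.choose n0.toNat (dv - 1).toNat : Int) * (n0 - (dv - 1))
        = (Nat.choose n0.toNat dv.toNat : Int) * dv := by
      have hnat := Nat.choose_succ_right_eq n0.toNat (dv - 1).toNat
      rw [hd1] at hnat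
      have hcast : ((Nat.choose n0.toNat dv.toNat * dv.toNat : Nat) : Int)
          = ((Nat.choose n0.toNat (dv - 1).toNat * (n0.toNat - (dv - 1).toNat) : Nat) : Int) :=
        congrArg (fun x : Nat => (x : Int)) hnat
      push_cast [Nat.cast_sub hdle] at hcast
      rw [show ((n0.toNat : Int)) = n0 by omega, show (((dv - 1).toNat : Int)) = dv - 1 by omega,
        show ((dv.toNat : Int)) = dv by omega] at hcast
      omega
    rw [key, PySem.Int.floordiv_eq_ediv_of_pos (by omega),
      Int.mul_ediv_cancel _ (by omega : dv ≠ 0)]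
    have := ih (dv + 1) (by omega) (by omega) (by omega)
    rw [show dv + 1 - 1 = dv by ring] at this
    rw [show n0 - (dv - 1) - 1 = n0 - dv by ring]
    exact this

theorem combi2A_eq (c i : Int) (hi : 0 ≤ i) : combi2A c i = chooseI c i := by
  unfold combi2A chooseI
  split_ifs with h
  · rfl
  · unfold combiA
    have := combiALoop_inv c i (by omega) i.toNat 1 (by omega) (by omega) (by omega)
    simpa using this

theorem binomB_fold (n : Int) :
    ∀ (t : Nat), (t : Int) ≤ n →
      (List.range t).foldl (fun (st : Int × Int) j => (st.1 * (n - (j : Nat)), st.2 * ((j : Nat) + 1))) ((1 : Int), (1 : Int))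
        = (((Nat.descFactorial n.toNat t : Nat) : Int), ((Nat.factorial t : Nat) : Int)) := by
  intro t
  induction t with
  | zero => intro _; simp
  | succ t ih =>
    intro hle
    rw [List.range_succ, List.foldl_append, ih (by omega)]
    simp only [List.foldl_cons, List.foldl_nil, Prod.mk.injEq]
    constructor
    · rw [Nat.descFactorial_succ]
      push_cast [Nat.cast_sub (by omega : t ≤ n.toNat)]
      rw [show ((n.toNat : Int)) = n by omega]
      ring
    · rw [Nat.factorial_succ]
      push_cast
      ring

theorem binomB_core (c t : Int) (h0 : 0 ≤ t) (hle : t ≤ c) :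
    PySem.Int.floordiv
      (((PySem.List.pyRange 0 t 1).foldl
        (fun (st : Int × Int) j => (st.1 * (c - j), st.2 * (j + 1))) (1, 1)).1)
      (((PySem.List.pyRange 0 t 1).foldl
        (fun (st : Int × Int) j => (st.1 * (c - j), st.2 * (j + 1))) (1, 1)).2)
      = (Nat.choose c.toNat t.toNat : Int) := by
  rw [PySem.List.pyRange_one, show t - 0 = t from by ring, List.foldl_map]
  have hfold := binomB_fold c t.toNat (by omega)
  have h2 : ((List.range t.toNat).foldl
      (fun (st : Int × Int) k => (st.1 * (c - ((0 : Int) + (k : Nat))), st.2 * (((0 : Int) + (k : Nat)) + 1))) ((1 : Int), (1 : Int)))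
      = (((Nat.descFactorial c.toNat t.toNat : Nat) : Int), ((Nat.factorial t.toNat : Nat) : Int)) := by
    simpa using hfold
  rw [h2, PySem.Int.floordiv_natCast, ← Nat.choose_eq_descFactorial_div_factorial]

theorem binomB_eq (c i : Int) (hi : 0 ≤ i) : binomB c i = chooseI c i := by
  unfold binomB chooseI
  split_ifs with h
  · rfl
  · rcases le_total i (c - i) with hmin | hmin
    · simp only [min_eq_left hmin]
      exact binomB_core c i hi (by omega)
    · simp only [min_eq_right hmin]
      have hc := binomB_core c (c - i) (by omega) (by omega)
      rw [show (c - i).toNat = c.toNat - i.toNat from by omega,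
        Nat.choose_symm (by omega)] at hc
      exact hc

theorem chooseI_mono {i : Int} (hi : 0 ≤ i) {c c' : Int} (h : c' ≤ c) :
    chooseI c' i ≤ chooseI c i := by
  unfold chooseI
  split_ifs with h1 h2 h2
  · exact le_refl 0
  · exact_mod_cast Nat.zero_le _
  · omega
  · exact_mod_cast Nat.choose_le_choose i.toNat (by omega)

theorem choose_lb_nat : ∀ (n k : Nat), 1 ≤ k → k ≤ n → n - k + 1 ≤ Nat.choose n k := by
  intro n
  induction n with
  | zero => intro k h1 h2; omega
  | succ n ih =>
    intro k h1 h2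
    rcases Nat.lt_or_ge n k with hlt | hge
    · have : k = n + 1 := by omega
      subst this
      simp [Nat.choose_self]
    · obtain ⟨k', rfl⟩ : ∃ k', k = k' + 1 := ⟨k - 1, by omega⟩
      rw [Nat.choose_succ_succ']
      have h3 := ih (k' + 1) h1 hge
      have h4 : 1 ≤ Nat.choose n k' := Nat.choose_pos (by omega)
      omega

theorem chooseI_lb {i c : Int} (hi : 1 ≤ i) (hc : i ≤ c) : c - i + 1 ≤ chooseI c i := by
  unfold chooseI
  rw [if_neg (by omega)]
  have := choose_lb_nat c.toNat i.toNat (by omega) (by omega)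
  have h2 : ((c.toNat - i.toNat + 1 : Nat) : Int) ≤ ((Nat.choose c.toNat i.toNat : Nat) : Int) := by
    exact_mod_cast this
  omega

theorem searchA_spec (value i : Int) (hi : 1 ≤ i) :
    ∀ (f : Nat) (cur : Int), i ≤ cur → (value + i + 1 - cur).toNat ≤ f →
      (cur = i ∨ chooseI (cur - 1) i ≤ value) →
      i ≤ searchA value i f cur ∧
      (searchA value i f cur = i ∨ chooseI (searchA value i f cur - 1) i ≤ value) ∧
      ¬ chooseI (searchA value i f cur) i ≤ value := by
  intro f
  induction f with
  | zero =>
    intro cur h1 h2 h3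
    simp only [searchA]
    refine ⟨h1, h3, fun hq => ?_⟩
    have := chooseI_lb hi h1
    omega
  | succ f ih =>
    intro cur h1 h2 h3
    simp only [searchA]
    rw [combi2A_eq _ _ (by omega)]
    split_ifs with hq
    · have hub := chooseI_lb hi h1
      exact ih (cur + 1) (by omega) (by omega) (Or.inr (by simpa using hq))
    · exact ⟨h1, h3, hq⟩

theorem doubB_spec (value i : Int) (hi : 1 ≤ i) :
    ∀ (f : Nat) (d : Int), 1 ≤ d → (value + i + 1 - (i - 1 + d)).toNat ≤ f →
      1 ≤ doubB value i f d ∧ ¬ chooseI (i - 1 + doubB value i f d) i ≤ value := by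
  intro f
  induction f with
  | zero =>
    intro d h1 h2
    simp only [doubB]
    refine ⟨h1, fun hq => ?_⟩
    have := chooseI_lb hi (show i ≤ i - 1 + d by omega)
    omega
  | succ f ih =>
    intro d h1 h2
    simp only [doubB]
    rw [binomB_eq _ _ (by omega)]
    split_ifs with hq
    · have hub := chooseI_lb hi (show i ≤ i - 1 + d by omega)
      exact ih (d * 2) (by omega) (by omega)
    · exact ⟨h1, hq⟩

theorem bsearchB_spec (value i : Int) (hi : 1 ≤ i) :
    ∀ (f : Nat) (lo hi' : Int), (hi' - lo).toNat ≤ f + 1 → i - 1 ≤ lo → lo < hi' →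
      (lo = i - 1 ∨ chooseI lo i ≤ value) → ¬ chooseI hi' i ≤ value →
      i - 1 ≤ bsearchB value i f lo hi' ∧
      (bsearchB value i f lo hi' = i - 1 ∨ chooseI (bsearchB value i f lo hi') i ≤ value) ∧
      ¬ chooseI (bsearchB value i f lo hi' + 1) i ≤ value := by
  intro f
  induction f with
  | zero =>
    intro lo hi' hn h1 h2 h3 h4
    have he : hi' = lo + 1 := by omega
    simp only [bsearchB]
    exact ⟨h1, h3, by rwa [he] at h4⟩
  | succ f ih =>
    intro lo hi' hn h1 h2 h3 h4
    rw [bsearchB_succ]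
    split_ifs with hgt hq
    · have e : lo + hi' = (lo + 1) + (hi' - 1) := by ring
      have hb := PySem.Int.floordiv_two_mid_bounds (lo := lo + 1) (hi := hi' - 1) (by omega)
      rw [← e] at hb
      exact ih (PySem.Int.floordiv (lo + hi') 2) hi' (by omega) (by omega) (by omega)
        (Or.inr (by rwa [binomB_eq _ _ (by omega)] at hq)) h4
    · have e : lo + hi' = (lo + 1) + (hi' - 1) := by ring
      have hb := PySem.Int.floordiv_two_mid_bounds (lo := lo + 1) (hi := hi' - 1) (by omega)
      rw [← e] at hb
      exact ih lo (PySem.Int.floordiv (lo + hi') 2) (by omega) h1 (by omega) h3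
        (by rwa [binomB_eq _ _ (by omega)] at hq)
    · have he : hi' = lo + 1 := by omega
      exact ⟨h1, h3, by rwa [he] at h4⟩

theorem ans_unique (value i : Int) (hi : 1 ≤ i) {a b : Int}
    (ha1 : i - 1 ≤ a) (ha2 : a = i - 1 ∨ chooseI a i ≤ value) (ha3 : ¬ chooseI (a + 1) i ≤ value)
    (hb1 : i - 1 ≤ b) (hb2 : b = i - 1 ∨ chooseI b i ≤ value) (hb3 : ¬ chooseI (b + 1) i ≤ value) :
    a = b := by
  rcases lt_trichotomy a b with h | h | h
  · exfalso
    have hqb : chooseI b i ≤ value := hb2.resolve_left (by omega)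
    exact ha3 (le_trans (chooseI_mono (by omega) (by omega)) hqb)
  · exact h
  · exfalso
    have hqa : chooseI a i ≤ value := ha2.resolve_left (by omega)
    exact hb3 (le_trans (chooseI_mono (by omega) (by omega)) hqa)

-- the per-step results of A and B coincide
theorem step_eq (value i : Int) (hi : 1 ≤ i) :
    searchA value i (value.toNat + 2) i - 1
      = bsearchB value i ((i - 1 + doubB value i (value.toNat + 2) 1) - (i - 1)).toNat
          (i - 1) (i - 1 + doubB value i (value.toNat + 2) 1) := by
  have hs := searchA_spec value i hi (value.toNat + 2) i (le_refl i) (by omega) (Or.inl rfl)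
  have hd := doubB_spec value i hi (value.toNat + 2) 1 (le_refl 1) (by omega)
  have hb := bsearchB_spec value i hi
      (((i - 1 + doubB value i (value.toNat + 2) 1) - (i - 1)).toNat)
      (i - 1) (i - 1 + doubB value i (value.toNat + 2) 1) (by omega)
      (le_refl _) (by omega) (Or.inl rfl) hd.2
  refine ans_unique value i hi ?_ ?_ ?_ hb.1 hb.2.1 hb.2.2
  · omega
  · rcases hs.2.1 with h | h
    · exact Or.inl (by omega)
    · exact Or.inr h
  · rw [show searchA value i (value.toNat + 2) i - 1 + 1 = searchA value i (value.toNat + 2) i by ring]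
    exact hs.2.2

theorem loop_eq : ∀ (n : Nat) (i value : Int) (acc out : List Int), i ≤ (n : Int) →
    acc.reverse = out →
    (((PySem.List.pyRange i 0 (-1)).foldl
      (fun (st : List Int × Int) j =>
        let cur := searchA st.2 j (st.2.toNat + 2) j - 1
        (st.1 ++ [cur], st.2 - combi2A cur j)) (acc, value)).1).reverse
      = loopB n value i out := by
  intro n
  induction n with
  | zero =>
    intro i value acc out hle hrev
    rw [PySem.List.pyRange_neg_one_eq_nil (by omega)]
    simp only [loopB, List.foldl_nil]
    exact hrev
  | succ n ih =>
    intro i value acc out hle hrev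
    by_cases hpos : 0 < i
    · rw [PySem.List.pyRange_neg_one_cons (by omega), List.foldl_cons,
        loopB_succ, if_pos hpos]
      have hstep := step_eq value i (by omega)
      rw [← hstep]
      have hsub : binomB (searchA value i (value.toNat + 2) i - 1) i
          = combi2A (searchA value i (value.toNat + 2) i - 1) i := by
        rw [combi2A_eq _ _ (by omega), binomB_eq _ _ (by omega)]
      rw [hsub]
      exact ih (i - 1) (value - combi2A (searchA value i (value.toNat + 2) i - 1) i)
        (acc ++ [searchA value i (value.toNat + 2) i - 1])
        ((searchA value i (value.toNat + 2) i - 1) :: out)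
        (by omega) (by simp [hrev])
    · rw [PySem.List.pyRange_neg_one_eq_nil (by omega), loopB_succ, if_neg hpos]
      simpa using hrev

-- ===== VERDICT (by name: the statement is the Claim_ definition above) =====
theorem scheme23_encode_ints_spec : Claim_equal_scheme23_encode_ints := by
  intro value m _ _
  unfold Spec_scheme23_encode_ints scheme23_encode_ints scheme23_encode_ints_alt
  simp only [PySem.List.slice?_none_none_neg_one, Option.getD_some]
  exact loop_eq m.toNat m value [] [] (by omega) rfl
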